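-- pv_equiv track=rewrite | github.com/wesleyd/aoc2017 | day09a.py | parse
-- ===== SOURCE A (Python) =====
-- def parse(inp):
--     ngroups = 0
--     sc = 0
--     depth = 0
--     in_garbage = False
--     cancel_next = False
--     for c in inp.strip():
--         if cancel_next:
--             cancel_next = False
--             continue
--         elif in_garbage:
--             if c == '>':
--                 in_garbage = False
--             if c == '!': cancel_next = True
--         elif c == '{':
--             ngroups += 1
--             depth += 1
--             sc += depth
--         elif c == '}':
--             depth -= 1
--         elif c == '<':
--             in_garbage = True
--     return sc
-- ===== SOURCE B (Python) =====
-- def parse(inp):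
--     # Phase 1: strip garbage segments (with '!' escapes; an unterminated '<'
--     # swallows to the end of input), phase 2: score braces in the clean stream.
--     def drop_garbage(cs, i):
--         n = len(cs)
--         while i < n:
--             if cs[i] == '>':
--                 return i + 1
--             if cs[i] == '!':
--                 i += 2
--             else:
--                 i += 1
--         return n
--
--     cs = inp.strip()
--     clean = []
--     i = 0
--     while i < len(cs):
--         if cs[i] == '<':
--             i = drop_garbage(cs, i + 1)
--         else:
--             clean.append(cs[i])
--             i += 1
--
--     score = 0
--     depth = 0
--     for c in clean:
--         if c == '{':
--             depth += 1
--             score += depth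
--         elif c == '}':
--             depth -= 1
--     return score
-- ===== Notes on version B (the rewrite author's own statement) =====
-- stated objective: alternative
-- what changed: Replaces A's single fused five-variable state machine by two phases: a garbage-stripping pass (handling '!' escapes and unterminated garbage) followed by a plain brace-scoring pass over the cleaned stream.
import Mathlib
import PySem

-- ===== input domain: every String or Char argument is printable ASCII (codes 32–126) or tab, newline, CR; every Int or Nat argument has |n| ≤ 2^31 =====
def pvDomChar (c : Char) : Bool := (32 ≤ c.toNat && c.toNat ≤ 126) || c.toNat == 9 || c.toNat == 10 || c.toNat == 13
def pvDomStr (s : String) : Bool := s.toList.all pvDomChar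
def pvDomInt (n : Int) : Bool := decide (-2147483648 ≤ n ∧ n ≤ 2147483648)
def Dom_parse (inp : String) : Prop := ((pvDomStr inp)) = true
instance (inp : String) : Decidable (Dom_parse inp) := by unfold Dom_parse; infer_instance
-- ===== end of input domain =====

-- B replaces A's single fused five-variable state machine by two phases
-- (strip garbage, then score braces); objective: alternative decomposition, same cost.

-- ===== PORT A =====
-- one step of A's loop over the state (ngroups, sc, depth, in_garbage, cancel_next)
def stepA (st : Int × Int × Int × Bool × Bool) (c : Char) : Int × Int × Int × Bool × Bool :=
  let (g, s, d, ig, cn) := st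
  if cn then (g, s, d, ig, false)
  else if ig then (g, s, d, (if c = '>' then false else ig), (if c = '!' then true else cn))
  else if c = '{' then (g + 1, s + (d + 1), d + 1, ig, cn)
  else if c = '}' then (g, s, d - 1, ig, cn)
  else if c = '<' then (g, s, d, true, cn)
  else (g, s, d, ig, cn)

def parse (inp : String) : Int :=
  (((PySem.Str.strip inp).toList).foldl stepA (0, 0, 0, false, false)).2.1

-- ===== PORT B =====
-- Source B's drop_garbage index loop, as structural recursion on the remaining chars
def dropGarb : List Char → List Char
  | [] => []
  | c :: rest =>
    if c = '>' then rest
    else if c = '!' then dropGarb (rest.drop 1)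
    else dropGarb rest
termination_by cs => cs.length
decreasing_by all_goals (simp only [List.length_drop, List.length_cons]; omega)

theorem dropGarb_length_le : ∀ cs : List Char, (dropGarb cs).length ≤ cs.length
  | [] => by simp [dropGarb]
  | c :: rest => by
    unfold dropGarb
    split_ifs
    · simp
    · have h1 := dropGarb_length_le (rest.drop 1)
      simp at h1 ⊢; omega
    · have h1 := dropGarb_length_le rest
      simp; omega
termination_by cs => cs.length
decreasing_by all_goals (simp only [List.length_drop, List.length_cons]; omega)

-- Source B's first while loop: build the garbage-free stream
def stripG : List Char → List Char
  | [] => []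
  | c :: rest =>
    if c = '<' then stripG (dropGarb rest)
    else c :: stripG rest
termination_by cs => cs.length
decreasing_by all_goals
  (have := dropGarb_length_le rest; simp only [List.length_cons]; omega)

-- Source B's scoring loop
def stepB (st : Int × Int) (c : Char) : Int × Int :=
  let (s, d) := st
  if c = '{' then (s + (d + 1), d + 1)
  else if c = '}' then (s, d - 1)
  else (s, d)

def parse_alt (inp : String) : Int :=
  ((stripG ((PySem.Str.strip inp).toList)).foldl stepB (0, 0)).1

-- ===== PRECONDITION & SPEC =====
def Spec_parse (inp : String) (out : Int) : Prop := out = parse_alt inp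
instance (inp : String) (out : Int) : Decidable (Spec_parse inp out) := by unfold Spec_parse; infer_instance

-- ===== CLAIM (what is proved, stated in full; the proofs are below) =====
def Claim_equal_parse : Prop := ∀ (inp : String), Dom_parse inp → Spec_parse inp (parse inp)

-- ===== LEMMAS AND PROOFS =====

-- A in the cancel_next state ignores one character
theorem foldA_cancel (rest : List Char) (g s d : Int) :
    ((rest).foldl stepA (g, s, d, true, true)).2.1
      = ((rest.drop 1).foldl stepA (g, s, d, true, false)).2.1 := by
  cases rest with
  | nil => simp
  | cons c r => simp [List.foldl_cons, stepA]

-- A in the garbage state, run over cs, scores like A in the normal state over dropGarb cs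
theorem foldA_garb : ∀ (cs : List Char) (g s d : Int),
    ((cs).foldl stepA (g, s, d, true, false)).2.1
      = ((dropGarb cs).foldl stepA (g, s, d, false, false)).2.1
  | [], g, s, d => by simp [dropGarb]
  | c :: rest, g, s, d => by
    unfold dropGarb
    by_cases h1 : c = '>'
    · simp [List.foldl_cons, stepA, h1]
    · by_cases h2 : c = '!'
      · rw [if_neg h1, if_pos h2]
        simp only [List.foldl_cons, stepA, if_neg h1, if_pos h2]
        simp only [Bool.false_eq_true, if_false, if_true]
        rw [foldA_cancel rest g s d]
        exact foldA_garb (rest.drop 1) g s d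
      · rw [if_neg h1, if_neg h2]
        simp only [List.foldl_cons, stepA, if_neg h1, if_neg h2]
        simp only [Bool.false_eq_true, if_false]
        exact foldA_garb rest g s d
termination_by cs => cs.length
decreasing_by all_goals (simp only [List.length_drop, List.length_cons]; omega)

-- main invariant: A's fused loop from a normal state scores like B's score loop over the stripped stream
theorem foldA_main : ∀ (cs : List Char) (g s d : Int),
    ((cs).foldl stepA (g, s, d, false, false)).2.1
      = ((stripG cs).foldl stepB (s, d)).1
  | [], g, s, d => by simp [stripG]
  | c :: rest, g, s, d => by
    unfold stripG
    by_cases h4 : c = '<'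
    · have h1 : ¬ c = '{' := by simp [h4]
      have h2 : ¬ c = '}' := by simp [h4]
      rw [if_pos h4]
      simp only [List.foldl_cons, stepA, if_neg h1, if_neg h2, if_pos h4]
      simp only [Bool.false_eq_true, if_false]
      rw [foldA_garb rest g s d]
      exact foldA_main (dropGarb rest) g s d
    · rw [if_neg h4]
      by_cases h1 : c = '{'
      · simp only [List.foldl_cons, stepA, stepB, if_pos h1]
        simp only [Bool.false_eq_true, if_false]
        exact foldA_main rest (g + 1) (s + (d + 1)) (d + 1)
      · by_cases h2 : c = '}'
        · simp only [List.foldl_cons, stepA, stepB, if_neg h1, if_pos h2]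
          simp only [Bool.false_eq_true, if_false]
          exact foldA_main rest g s (d - 1)
        · simp only [List.foldl_cons, stepA, stepB, if_neg h1, if_neg h2, if_neg h4]
          simp only [Bool.false_eq_true, if_false]
          exact foldA_main rest g s d
termination_by cs => cs.length
decreasing_by all_goals
  (have := dropGarb_length_le rest; simp only [List.length_cons]; omega)

-- ===== VERDICT (by name: the statement is the Claim_ definition above) =====
theorem parse_spec : Claim_equal_parse := by
  intro inp _
  unfold Spec_parse parse parse_alt
  exact foldA_main ((PySem.Str.strip inp).toList) 0 0 0
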